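-- pv_equiv track=rewrite | github.com/cilasbeltrame/gcp-k8s-auto-cidr-generator-non-overlapping | auto_gen_cidr.py | create_subnets
-- ===== SOURCE A (Python) =====
-- import ipaddress
--
-- def create_subnets(max_subnets, mask, cidr_class):
--     subnets = []
--     # Define a list of IP addresses representing Class A, B, and C networks
--     # Defining everything as /8 here since GCP doesn't have a range for main VPC,
--     # ipaddress lib needs that to calculate the range, so the following is needed.
--     ip_addresses_class = {"a": "10.0.0.0/8", "b": "172.0.0.0/8", "c": "192.0.0.0/8"}
--
--     # Variable to choose the class
--     chosen_class = (
--         cidr_class  # You can change this to 'b' or 'c' to choose different classes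
--     )
--
--     # Accessing the chosen class from the dictionary
--     chosen_ip_address = ip_addresses_class.get(chosen_class)
--     ip_addresses = ipaddress.IPv4Network(chosen_ip_address)
--
--     # Counter to keep track of the number of subnets created
--     subnet_count = 0
--
--     for sn in ip_addresses.subnets(new_prefix=mask):
--         if (
--             subnet_count >= max_subnets
--         ):  # Check if the maximum number of subnets is reached
--             break  # Exit the loop if the maximum is reached
--         subnets.append(str(sn))
--         subnet_count += 1
--     return subnets
-- ===== SOURCE B (Python) =====
-- def create_subnets(max_subnets, mask, cidr_class):
--     # Closed-form: compute each subnet's network address by index arithmetic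
--     # instead of iterating a generator of networks.
--     bases = {"a": 10, "b": 172, "c": 192}
--     if cidr_class not in bases:
--         raise ValueError("unknown CIDR class: %r" % (cidr_class,))
--     if not 8 <= mask <= 32:
--         raise ValueError("mask must be between 8 and 32")
--     base = bases[cidr_class] * 16777216
--     step = 2 ** (32 - mask)
--     count = min(max(max_subnets, 0), 2 ** (mask - 8))
--     return [
--         "%d.%d.%d.%d/%d"
--         % (a // 16777216, a // 65536 % 256, a // 256 % 256, a % 256, mask)
--         for a in (base + i * step for i in range(count))
--     ]
-- ===== Notes on version B (the rewrite author's own statement) =====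
-- stated objective: alternative
-- what changed: Replaces iteration of ipaddress's subnets() generator with closed-form index arithmetic: count = min(max(max_subnets,0), 2^(mask-8)) subnets are built directly as base + i*step.
import Mathlib
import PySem

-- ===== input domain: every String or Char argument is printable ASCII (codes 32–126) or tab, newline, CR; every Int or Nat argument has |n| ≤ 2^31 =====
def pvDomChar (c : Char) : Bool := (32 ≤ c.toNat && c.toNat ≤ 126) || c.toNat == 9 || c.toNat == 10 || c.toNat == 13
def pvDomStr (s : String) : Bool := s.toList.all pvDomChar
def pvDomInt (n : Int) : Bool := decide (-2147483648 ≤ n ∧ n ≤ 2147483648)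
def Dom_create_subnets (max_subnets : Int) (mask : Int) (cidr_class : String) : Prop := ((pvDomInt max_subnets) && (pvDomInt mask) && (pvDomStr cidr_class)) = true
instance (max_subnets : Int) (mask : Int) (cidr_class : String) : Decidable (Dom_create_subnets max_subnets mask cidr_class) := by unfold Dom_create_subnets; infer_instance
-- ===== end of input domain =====

-- B replaces A's iteration of the subnets() generator with closed-form index
-- arithmetic (count = min(max(max_subnets,0), 2^(mask-8)), i-th address = base + i*step);
-- objective: alternative decomposition (direct indexing instead of generator stepping).

-- ===== PORT A =====

-- "<dotted-quad of addr>/<mask>": A's str(IPv4Network) and B's "%d.%d.%d.%d/%d"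
-- format compute exactly this for 0 ≤ addr < 2^32, 0 ≤ mask.
def pvNetStr (mask : Int) (addr : Int) : String :=
  PySem.Int.toStr (PySem.Int.floordiv addr 16777216) ++ "." ++
  PySem.Int.toStr (PySem.Int.mod (PySem.Int.floordiv addr 65536) 256) ++ "." ++
  PySem.Int.toStr (PySem.Int.mod (PySem.Int.floordiv addr 256) 256) ++ "." ++
  PySem.Int.toStr (PySem.Int.mod addr 256) ++ "/" ++ PySem.Int.toStr mask

-- A's ip_addresses_class dict; each value is IPv4Network("<x>/8") represented by
-- its numeric network address (all three have prefixlen 8).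
def pvBaseDict : PySem.Dict String Int :=
  PySem.Dict.ofList [("a", 167772160), ("b", 2885681152), ("c", 3221225472)]

-- A's `for sn in ip_addresses.subnets(new_prefix=mask)` loop: the generator yields
-- `remaining = 2^(mask-8)` networks, stepping the address by 2^(32-mask) each time;
-- the loop breaks once subnet_count reaches max_subnets.
def pvALoop (max_subnets mask step : Int) : Nat → Int → Int → List String → List String
  | 0, _, _, acc => acc.reverse
  | r + 1, addr, cnt, acc =>
      if cnt ≥ max_subnets then acc.reverse
      else pvALoop max_subnets mask step r (addr + step) (cnt + 1) (pvNetStr mask addr :: acc)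

def create_subnets (max_subnets : Int) (mask : Int) (cidr_class : String) : List String :=
  match pvBaseDict.get? cidr_class with
  | none => []  -- Python raises AddressValueError (IPv4Network(None)); excluded by Pre_
  | some base =>
      -- mask < 8 or mask > 32 makes subnets() raise ValueError; excluded by Pre_
      pvALoop max_subnets mask ((2:Int) ^ ((32 - mask).toNat))
        ((2:Int) ^ ((mask - 8).toNat)).toNat base 0 []

-- ===== PORT B =====
def create_subnets_alt (max_subnets : Int) (mask : Int) (cidr_class : String) : List String :=
  match pvBaseDict.get? cidr_class with
  | none => []  -- B raises AddressValueError here too; excluded by Pre_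
  | some base =>
      -- mask < 8 or mask > 32: B raises ValueError; excluded by Pre_
      let step : Int := (2:Int) ^ ((32 - mask).toNat)
      let avail : Int := (2:Int) ^ ((mask - 8).toNat)
      let count : Int := min (max max_subnets 0) avail
      (PySem.List.pyRange 0 count 1).map (fun i => pvNetStr mask (base + i * step))

-- ===== PRECONDITION & SPEC =====
-- Pre_ excludes exactly the inputs where A raises: an unknown cidr_class
-- (IPv4Network(None) → AddressValueError) and mask outside 8..32 (ValueError from subnets()).
def Pre_create_subnets (max_subnets : Int) (mask : Int) (cidr_class : String) : Prop :=
  (cidr_class = "a" ∨ cidr_class = "b" ∨ cidr_class = "c") ∧ 8 ≤ mask ∧ mask ≤ 32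
instance (max_subnets : Int) (mask : Int) (cidr_class : String) : Decidable (Pre_create_subnets max_subnets mask cidr_class) := by unfold Pre_create_subnets; infer_instance

def pvWitness_create_subnets : Int × Int × String := (3, 10, "a")

def Spec_create_subnets (max_subnets : Int) (mask : Int) (cidr_class : String) (out : List String) : Prop := out = create_subnets_alt max_subnets mask cidr_class
instance (max_subnets : Int) (mask : Int) (cidr_class : String) (out : List String) : Decidable (Spec_create_subnets max_subnets mask cidr_class out) := by unfold Spec_create_subnets; infer_instance

-- ===== CLAIM (what is proved, stated in full; the proofs are below) =====
def Claim_equal_create_subnets : Prop := ∀ (max_subnets : Int) (mask : Int) (cidr_class : String), Dom_create_subnets max_subnets mask cidr_class → Pre_create_subnets max_subnets mask cidr_class → Spec_create_subnets max_subnets mask cidr_class (create_subnets max_subnets mask cidr_class)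

-- ===== LEMMAS AND PROOFS =====

-- A's break-counting loop produces exactly the first min(max(M-cnt,0), r) indexed
-- network strings starting at addr.
theorem pvALoop_eq (M mask step : Int) :
    ∀ (r : Nat) (addr cnt : Int) (acc : List String),
      pvALoop M mask step r addr cnt acc =
        acc.reverse ++ (PySem.List.pyRange 0 (min (max (M - cnt) 0) (r : Int)) 1).map
          (fun i => pvNetStr mask (addr + i * step)) := by
  intro r
  induction r with
  | zero =>
      intro addr cnt acc
      simp [pvALoop]
  | succ r ih =>
      intro addr cnt acc
      by_cases h : cnt ≥ M
      · have : min (max (M - cnt) 0) ((r + 1 : Nat) : Int) = 0 := by omega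
        simp [pvALoop, h]
      · have hM : cnt < M := by omega
        have ht : (0:Int) < min (max (M - cnt) 0) ((r + 1 : Nat) : Int) := by
          push_cast; omega
        rw [pvALoop, if_neg (by omega), ih, PySem.List.pyRange_one_cons ht]
        have hmap : (PySem.List.pyRange 0 (min (max (M - (cnt + 1)) 0) ((r : Nat) : Int)) 1).map
              (fun i => pvNetStr mask (addr + step + i * step))
            = (PySem.List.pyRange 1 (min (max (M - cnt) 0) ((r + 1 : Nat) : Int)) 1).map
              (fun i => pvNetStr mask (addr + i * step)) := by
          rw [PySem.List.pyRange_one 0, PySem.List.pyRange_one 1, List.map_map, List.map_map]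
          have hlen : (min (max (M - (cnt + 1)) 0) ((r : Nat) : Int) - 0).toNat
              = (min (max (M - cnt) 0) ((r + 1 : Nat) : Int) - 1).toNat := by
            omega
          rw [hlen]
          apply List.map_congr_left
          intro k _
          simp only [Function.comp]
          congr 1
          push_cast
          ring
        simp [hmap]

theorem create_subnets_eq_alt (max_subnets mask : Int) (cidr_class : String) :
    create_subnets max_subnets mask cidr_class = create_subnets_alt max_subnets mask cidr_class := by
  unfold create_subnets create_subnets_alt
  cases pvBaseDict.get? cidr_class with
  | none => rfl
  | some base =>
      simp only []
      rw [pvALoop_eq]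
      have hpow : (0:Int) ≤ (2:Int) ^ ((mask - 8).toNat) := by positivity
      have hcast : ((((2:Int) ^ ((mask - 8).toNat)).toNat : Nat) : Int)
          = (2:Int) ^ ((mask - 8).toNat) := Int.toNat_of_nonneg hpow
      rw [hcast]
      simp only [List.reverse_nil, List.nil_append, sub_zero]

-- ===== VERDICT (by name: the statement is the Claim_ definition above) =====
theorem create_subnets_spec : Claim_equal_create_subnets := by
  intro max_subnets mask cidr_class _ _
  unfold Spec_create_subnets
  exact create_subnets_eq_alt max_subnets mask cidr_class
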